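-- pv_equiv track=rewrite | github.com/pypi-data/pypi-mirror-371 | packages/python-bdtool/python_bdtool-0.0.1004-py3-none-any.whl/bdtool/string.py | parse_nested_blocks
-- ===== SOURCE A (Python) =====
-- def parse_nested_blocks(text, delimiters: str = "{}") -> list[tuple]:
--     """Use the stack to track delimiters and parse nested delimiters"""
--     if not isinstance(delimiters, str) or len(delimiters) != 2 or delimiters[0] == delimiters[1]:
--         raise ValueError("Delimiter tuple must have exactly two different char.")
--     left, right = delimiters
--     nested_blocks = []
--     stack = []
--     flag = 1
--     literal_text, field= ([], [])
--     for char in text: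
--         if char == left:
--             if not stack:  # 栈为空时，标记新嵌套块的开始
--                 flag = 2
--             else:
--                 field.append(char)
--             stack.append(char)  # 入栈，增加层级
--         elif char == right:
--             if stack:  # 栈不为空时，出栈减少层级
--                 stack.pop()
--                 if not stack:  # 栈为空时，说明当前嵌套块结束
--                     nested_blocks.append(("".join(literal_text), "".join(field)))
--                     flag = 1
--                     literal_text, field= ([], [])
--                 else:
--                     field.append(char)
--         elif flag == 1:
--             literal_text.append(char)
--         elif flag == 2:
--             field.append(char)
--
--     return nested_blocks
-- ===== SOURCE B (Python) =====
-- def parse_nested_blocks(text, delimiters: str = "{}") -> list[tuple]: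
--     """Nested-loop re-implementation: no stack, a depth counter in an inner scan."""
--     if not isinstance(delimiters, str) or len(delimiters) != 2 or delimiters[0] == delimiters[1]:
--         raise ValueError("Delimiter tuple must have exactly two different char.")
--     left, right = delimiters
--     out = []
--     lit = []
--     it = iter(text)
--     for c in it:
--         if c == left:
--             field = []
--             depth = 1
--             closed = False
--             for c2 in it:
--                 if c2 == left:
--                     depth += 1
--                 elif c2 == right:
--                     depth -= 1
--                     if depth == 0:
--                         closed = True
--                         break
--                 field.append(c2)
--             if not closed:
--                 break
--             out.append(("".join(lit), "".join(field)))
--             lit = []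
--         elif c != right:
--             lit.append(c)
--     return out
-- ===== Notes on version B (the rewrite author's own statement) =====
-- stated objective: alternative
-- what changed: Replaces A's single-pass state machine (explicit stack list plus a literal/field mode flag) by an outer loop that collects literal text and, at each opening delimiter, an inner scan with a plain depth counter that extracts the whole block.
import Mathlib
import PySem

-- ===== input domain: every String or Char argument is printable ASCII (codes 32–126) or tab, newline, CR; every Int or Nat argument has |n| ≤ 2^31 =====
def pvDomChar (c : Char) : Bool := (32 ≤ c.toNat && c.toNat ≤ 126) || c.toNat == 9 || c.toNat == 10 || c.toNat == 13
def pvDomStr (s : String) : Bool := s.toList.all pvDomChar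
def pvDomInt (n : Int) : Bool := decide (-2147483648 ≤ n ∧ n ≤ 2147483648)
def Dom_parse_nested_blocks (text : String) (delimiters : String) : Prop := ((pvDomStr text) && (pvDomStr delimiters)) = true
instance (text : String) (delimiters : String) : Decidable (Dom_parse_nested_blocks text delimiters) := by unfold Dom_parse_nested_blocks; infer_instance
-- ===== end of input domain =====

-- B replaces A's stack/flag single-pass state machine by an outer literal loop with an inner
-- depth-counter scan for each block (objective: alternative decomposition, same cost).

-- ===== PORT A =====
-- one step of A's for-loop; state = (nested_blocks, stack, flag, literal_text, field)
-- stack.pop() on a nonempty list is List.dropLast (removes the last element, exact here)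
def aStep (left right : Char) (s : List (String × String) × List Char × Int × List Char × List Char)
    (c : Char) : List (String × String) × List Char × Int × List Char × List Char :=
  match s with
  | (blocks, stack, flag, lit, field) =>
    if c == left then
      if stack.isEmpty then (blocks, stack ++ [c], 2, lit, field)
      else (blocks, stack ++ [c], flag, lit, field ++ [c])
    else if c == right then
      if stack.isEmpty then (blocks, stack, flag, lit, field)
      else
        let stack' := stack.dropLast
        if stack'.isEmpty then (blocks ++ [(String.mk lit, String.mk field)], stack', 1, [], [])
        else (blocks, stack', flag, lit, field ++ [c])
    else if flag == 1 then (blocks, stack, flag, lit ++ [c], field)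
    else if flag == 2 then (blocks, stack, flag, lit, field ++ [c])
    else (blocks, stack, flag, lit, field)

def parse_nested_blocks (text : String) (delimiters : String) : List (String × String) :=
  match delimiters.toList with
  | [left, right] =>
    if left == right then []   -- Python raises ValueError here (outside Pre_)
    else (text.toList.foldl (aStep left right) ([], [], 1, [], [])).1
  | _ => []                    -- Python raises ValueError here (outside Pre_)

-- ===== PORT B =====
-- inner for-loop over the shared iterator: returns (field, rest) at the matching closer, none if exhausted
def bField (left right : Char) (field : List Char) (depth : Int) :
    List Char → Option (List Char × List Char)
  | [] => none
  | c :: cs =>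
    if c == left then bField left right (field ++ [c]) (depth + 1) cs
    else if c == right then
      if depth - 1 == 0 then some (field, cs)
      else bField left right (field ++ [c]) (depth - 1) cs
    else bField left right (field ++ [c]) depth cs

-- outer for-loop; state = (out, lit), rest of the shared iterator is the last argument.
-- fuel only bounds the recursion (any fuel ≥ the list length gives the loop's value): same computation, made total
def bBlocks (left right : Char) : Nat → List (String × String) → List Char → List Char → List (String × String)
  | 0, out, _, _ => out
  | fuel + 1, out, lit, cs =>
    match cs with
    | [] => out
    | c :: cs =>
      if c == left then
        match bField left right [] 1 cs with
        | none => out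
        | some (f, rest) => bBlocks left right fuel (out ++ [(String.mk lit, String.mk f)]) [] rest
      else if c == right then bBlocks left right fuel out lit cs
      else bBlocks left right fuel out (lit ++ [c]) cs

def parse_nested_blocks_alt (text : String) (delimiters : String) : List (String × String) :=
  match delimiters.toList with
  | [] => []                   -- Python raises ValueError here (outside Pre_)
  | [_] => []                  -- Python raises ValueError here (outside Pre_)
  | left :: right :: rest =>
    if rest.isEmpty && !(left == right) then bBlocks left right text.toList.length [] [] text.toList
    else []                    -- Python raises ValueError here (outside Pre_)

-- ===== PRECONDITION & SPEC =====
-- A raises ValueError unless delimiters has exactly two distinct characters; Pre_ is exactly that.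
def Pre_parse_nested_blocks (text : String) (delimiters : String) : Prop :=
  delimiters.toList.length = 2 ∧ delimiters.toList[0]? ≠ delimiters.toList[1]?

instance (text : String) (delimiters : String) : Decidable (Pre_parse_nested_blocks text delimiters) := by
  unfold Pre_parse_nested_blocks; infer_instance

def pvWitness_parse_nested_blocks : String × String := ("a{b{c}d}e{f}", "{}")

def Spec_parse_nested_blocks (text : String) (delimiters : String) (out : List (String × String)) : Prop := out = parse_nested_blocks_alt text delimiters
instance (text : String) (delimiters : String) (out : List (String × String)) : Decidable (Spec_parse_nested_blocks text delimiters out) := by unfold Spec_parse_nested_blocks; infer_instance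

-- ===== CLAIM (what is proved, stated in full; the proofs are below) =====
def Claim_equal_parse_nested_blocks : Prop := ∀ (text : String) (delimiters : String), Dom_parse_nested_blocks text delimiters → Pre_parse_nested_blocks text delimiters → Spec_parse_nested_blocks text delimiters (parse_nested_blocks text delimiters)

-- ===== LEMMAS AND PROOFS =====

-- B's inner scan never returns a longer rest than it was given
theorem bField_rest_le (left right : Char) :
    ∀ (cs : List Char) (field : List Char) (depth : Int) (f rest : List Char),
      bField left right field depth cs = some (f, rest) → rest.length ≤ cs.length := by
  intro cs
  induction cs with
  | nil => intro field depth f rest h; simp [bField] at h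
  | cons c cs ih =>
    intro field depth f rest h
    simp only [bField] at h
    split_ifs at h with h1 h2 h3
    · exact Nat.le_succ_of_le (ih _ _ _ _ h)
    · simp at h; simp [h.2]
    · exact Nat.le_succ_of_le (ih _ _ _ _ h)
    · exact Nat.le_succ_of_le (ih _ _ _ _ h)


-- while inside a block (flag = 2, nonempty stack of |stack| = depth), A's remaining fold
-- agrees with B's inner scan followed by A's fold on the rest
theorem field_phase (left right : Char) (hlr : left ≠ right) :
    ∀ (cs stack : List Char) (acc : List (String × String)) (lit field : List Char),
      stack ≠ [] →
      (cs.foldl (aStep left right) (acc, stack, 2, lit, field)).1 =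
        (match bField left right field (stack.length : Int) cs with
         | none => acc
         | some (f, rest) =>
             (rest.foldl (aStep left right) (acc ++ [(String.mk lit, String.mk f)], [], 1, [], [])).1) := by
  intro cs
  induction cs with
  | nil => intro stack acc lit field hs; simp [bField]
  | cons c cs ih =>
    intro stack acc lit field hs
    have hne : stack.isEmpty = false := by simpa [List.isEmpty_iff] using hs
    by_cases hcl : c = left
    · have hstep : aStep left right (acc, stack, 2, lit, field) c
          = (acc, stack ++ [c], 2, lit, field ++ [c]) := by
        simp [aStep, hcl, hne]
      have hcast : (((stack ++ [c]).length : Nat) : Int) = (stack.length : Int) + 1 := by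
        simp
      rw [List.foldl_cons, hstep, ih (stack ++ [c]) acc lit (field ++ [c]) (by simp)]
      rw [hcast]
      simp [bField, hcl]
    · by_cases hcr : c = right
      · have hrl : ¬ right = left := fun h => hlr h.symm
        by_cases h1 : stack.length = 1
        · have hdl : stack.dropLast.isEmpty = true := by
            rw [List.isEmpty_iff, ← List.length_eq_zero_iff, List.length_dropLast, h1]
          have hdl2 : stack.dropLast = [] := by simpa [List.isEmpty_iff] using hdl
          have hstep : aStep left right (acc, stack, 2, lit, field) c
              = (acc ++ [(String.mk lit, String.mk field)], [], 1, [], []) := by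
            simp [aStep, hcr, hrl, hne, hdl2]
          rw [List.foldl_cons, hstep]
          have hb : bField left right field (stack.length : Int) (c :: cs)
              = some (field, cs) := by
            simp [bField, hcr, hrl, h1]
          rw [hb]
        · have h2 : 2 ≤ stack.length := by
            have := List.length_pos_iff.mpr hs
            omega
          have hdl : stack.dropLast.isEmpty = false := by
            rw [List.isEmpty_eq_false_iff, ← List.length_pos_iff, List.length_dropLast]
            omega
          have hdlne : stack.dropLast ≠ [] := by
            simpa [List.isEmpty_eq_false_iff] using hdl
          have hbl : (c == left) = false := by simp [hcl]
          have hbr : (c == right) = true := by simp [hcr]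
          have hstep : aStep left right (acc, stack, 2, lit, field) c
              = (acc, stack.dropLast, 2, lit, field ++ [c]) := by
            simp [aStep, hbl, hbr, hne, hdl]
          rw [List.foldl_cons, hstep, ih stack.dropLast acc lit (field ++ [c]) hdlne]
          have hcast : ((stack.dropLast.length : Nat) : Int) = (stack.length : Int) - 1 := by
            rw [List.length_dropLast]; omega
          have hd0 : ((stack.length : Int) - 1 == 0) = false := by
            simp only [beq_eq_false_iff_ne, ne_eq]
            omega
          rw [hcast]
          simp [bField, hbl, hbr, hd0]
      · have hstep : aStep left right (acc, stack, 2, lit, field) c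
            = (acc, stack, 2, lit, field ++ [c]) := by
          simp [aStep, hcl, hcr]
        rw [List.foldl_cons, hstep, ih stack acc lit (field ++ [c]) hs]
        simp [bField, hcl, hcr]

-- at top level (flag = 1, empty stack), A's remaining fold agrees with B's outer loop
theorem top_phase (left right : Char) (hlr : left ≠ right) :
    ∀ (n : Nat) (cs : List Char), cs.length ≤ n →
      ∀ (acc : List (String × String)) (lit : List Char),
        (cs.foldl (aStep left right) (acc, [], 1, lit, [])).1 = bBlocks left right n acc lit cs := by
  intro n
  induction n with
  | zero =>
    intro cs hlen acc lit
    have hcs : cs = [] := List.length_eq_zero_iff.mp (Nat.le_zero.mp hlen)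
    subst hcs
    simp [bBlocks]
  | succ n ih =>
    intro cs hlen acc lit
    match cs with
    | [] => simp [bBlocks]
    | c :: cs =>
      by_cases hcl : c = left
      · have hstep : aStep left right (acc, [], 1, lit, []) c
            = (acc, [c], 2, lit, []) := by simp [aStep, hcl]
        rw [List.foldl_cons, hstep,
          field_phase left right hlr cs [c] acc lit [] (by simp)]
        have h1 : (([c].length : Nat) : Int) = 1 := by simp
        rw [h1]
        cases h : bField left right [] 1 cs with
        | none => simp [bBlocks, h, hcl]
        | some p =>
          obtain ⟨f, rest⟩ := p
          have hle := bField_rest_le left right cs [] 1 f rest h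
          dsimp only
          rw [ih rest (by simp at hlen; omega) (acc ++ [(String.mk lit, String.mk f)]) []]
          simp [bBlocks, h, hcl]
      · by_cases hcr : c = right
        · have hrl : ¬ right = left := fun h => hlr h.symm
          have hstep : aStep left right (acc, [], 1, lit, []) c
              = (acc, [], 1, lit, []) := by simp [aStep, hcr, hrl]
          rw [List.foldl_cons, hstep, ih cs (by simp at hlen; omega) acc lit]
          simp [bBlocks, hcr, hrl]
        · have hstep : aStep left right (acc, [], 1, lit, []) c
              = (acc, [], 1, lit ++ [c], []) := by simp [aStep, hcl, hcr]
          rw [List.foldl_cons, hstep, ih cs (by simp at hlen; omega) acc (lit ++ [c])]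
          simp [bBlocks, hcl, hcr]

-- ===== VERDICT (by name: the statement is the Claim_ definition above) =====
theorem parse_nested_blocks_spec : Claim_equal_parse_nested_blocks := by
  intro text delimiters _ hpre
  unfold Spec_parse_nested_blocks parse_nested_blocks parse_nested_blocks_alt
  obtain ⟨hlen, hne⟩ := hpre
  match hd : delimiters.toList with
  | [l, r] =>
    have hlr : l ≠ r := by simp [hd] at hne; exact hne
    simp [hlr]
    exact top_phase l r hlr text.toList.length text.toList le_rfl [] []
  | [] => simp [hd] at hlen
  | [_] => simp [hd] at hlen
  | _ :: _ :: _ :: _ => simp [hd] at hlen
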